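-- pv_equiv track=rewrite | github.com/CrepuscularIRIS/Beatless | archive/task_os_scheduler.py | _all_within_paths
-- ===== SOURCE A (Python) =====
-- from typing import Any, Dict, List, Optional, Tuple
--
-- def _all_within_paths(changed_files: List[str], editable_paths: List[str]) -> List[str]:
--     normalized_allowed = [p.rstrip("/") for p in editable_paths]
--     violations: List[str] = []
--     for f in changed_files:
--         ff = f.strip()
--         if not ff:
--             continue
--         ok = any(ff == p or ff.startswith(p + "/") for p in normalized_allowed)
--         if not ok:
--             violations.append(ff)
--     return violations
-- ===== SOURCE B (Python) =====
-- from typing import List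
--
--
-- def _ancestor_prefixes(ff: str):
--     # ff itself, plus every prefix of ff that ends just before a '/'
--     yield ff
--     for i, ch in enumerate(ff):
--         if ch == "/":
--             yield ff[:i]
--
--
-- def _all_within_paths(changed_files: List[str], editable_paths: List[str]) -> List[str]:
--     allowed = {p.rstrip("/") for p in editable_paths}
--     violations: List[str] = []
--     for f in changed_files:
--         ff = f.strip()
--         if ff and not any(pre in allowed for pre in _ancestor_prefixes(ff)):
--             violations.append(ff)
--     return violations
-- ===== Notes on version B (the rewrite author's own statement) =====
-- stated objective: faster
-- what changed: B builds a hash set of the normalized allowed paths once and tests each file's '/'-cut ancestor prefixes for membership, instead of scanning every allowed path per file with string-prefix comparisons.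
import Mathlib
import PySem

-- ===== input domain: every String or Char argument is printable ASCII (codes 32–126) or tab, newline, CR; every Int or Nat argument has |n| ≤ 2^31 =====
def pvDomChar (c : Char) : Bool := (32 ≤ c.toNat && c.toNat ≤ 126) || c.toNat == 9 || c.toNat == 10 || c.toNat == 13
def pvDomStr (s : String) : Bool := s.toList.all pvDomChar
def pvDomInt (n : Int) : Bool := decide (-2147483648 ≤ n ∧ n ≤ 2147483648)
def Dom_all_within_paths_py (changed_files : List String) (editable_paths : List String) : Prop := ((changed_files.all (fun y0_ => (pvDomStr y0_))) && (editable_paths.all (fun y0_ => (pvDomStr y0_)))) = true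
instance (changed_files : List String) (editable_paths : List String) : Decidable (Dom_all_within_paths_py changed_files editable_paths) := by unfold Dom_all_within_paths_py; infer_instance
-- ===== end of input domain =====

-- B replaces A's per-file scan over all allowed paths by one hash set of normalized
-- allowed paths, probed with each file's '/'-cut ancestor prefixes (objective: faster).


-- ===== PORT A =====
-- p.rstrip("/"): drop all trailing '/' characters — exact hand port (PySem has no
-- single-sided strip with an explicit character set).
def pyRstripSlash (p : String) : String :=
  String.ofList ((p.toList.reverse.dropWhile (fun c => c == '/')).reverse)

def all_within_paths_py (changed_files : List String) (editable_paths : List String) : List String :=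
  let normalized_allowed := editable_paths.map pyRstripSlash
  changed_files.foldl (fun violations f =>
    let ff := PySem.Str.strip f
    if ff = "" then violations
    else
      let ok := normalized_allowed.any (fun p => ff == p || PySem.Str.startswith ff (p ++ "/"))
      if ok then violations else violations ++ [ff]) []

-- ===== PORT B =====
-- ff itself plus every ff[:i] with ff[i] == '/' (ff[:i] ported as take i, exact for 0 ≤ i ≤ len)
def ancestorPrefixes (ff : String) : List String :=
  ff :: (List.range ff.toList.length).filterMap
    (fun i => if ff.toList[i]? = some '/' then some (String.ofList (ff.toList.take i)) else none)

def all_within_paths_py_alt (changed_files : List String) (editable_paths : List String) : List String :=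
  let allowed : PySem.Set String := PySem.Set.ofList (editable_paths.map pyRstripSlash)
  changed_files.foldl (fun violations f =>
    let ff := PySem.Str.strip f
    if ff ≠ "" ∧ ¬ (ancestorPrefixes ff).any (fun pre => PySem.Set.contains allowed pre)
    then violations ++ [ff] else violations) []

-- ===== PRECONDITION & SPEC =====
def Spec_all_within_paths_py (changed_files : List String) (editable_paths : List String) (out : List String) : Prop := out = all_within_paths_py_alt changed_files editable_paths
instance (changed_files : List String) (editable_paths : List String) (out : List String) : Decidable (Spec_all_within_paths_py changed_files editable_paths out) := by unfold Spec_all_within_paths_py; infer_instance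

-- ===== CLAIM (what is proved, stated in full; the proofs are below) =====
def Claim_equal_all_within_paths_py : Prop := ∀ (changed_files : List String) (editable_paths : List String), Dom_all_within_paths_py changed_files editable_paths → Spec_all_within_paths_py changed_files editable_paths (all_within_paths_py changed_files editable_paths)

-- ===== LEMMAS AND PROOFS =====

theorem mem_ancestorPrefixes_iff (ff p : String) :
    p ∈ ancestorPrefixes ff ↔ (ff = p ∨ (p.toList ++ ['/']) <+: ff.toList) := by
  simp only [ancestorPrefixes, List.mem_cons, List.mem_filterMap, List.mem_range]
  constructor
  · rintro (rfl | ⟨i, hi, hif⟩)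
    · exact Or.inl rfl
    · split at hif
      · rename_i hsl
        cases hif
        refine Or.inr ?_
        have hlen : (String.ofList (ff.toList.take i)).toList = ff.toList.take i :=
          String.toList_ofList
        rw [hlen]
        have : ff.toList.take i ++ ['/'] = ff.toList.take (i + 1) := by
          rw [List.take_add_one, hsl]; rfl
        rw [this]
        exact List.take_prefix _ _
      · cases hif
  · rintro (rfl | ⟨t, ht⟩)
    · exact Or.inl rfl
    · have ht' : p.toList ++ '/' :: t = ff.toList := by rw [← ht]; simp
      refine Or.inr ⟨p.toList.length, ?_, ?_⟩
      · rw [← ht']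
        simp [List.length_append]
      · have hget : ff.toList[p.toList.length]? = some '/' := by
          rw [← ht', List.getElem?_append_right (le_refl _)]
          simp
        have htake : ff.toList.take p.toList.length = p.toList := by
          rw [← ht', List.take_left' rfl]
        rw [hget, if_pos rfl, htake, String.ofList_toList]

theorem ok_eq (ff : String) (allowed : List String) :
    allowed.any (fun p => ff == p || PySem.Str.startswith ff (p ++ "/"))
      = (ancestorPrefixes ff).any
          (fun pre => PySem.Set.contains (PySem.Set.ofList allowed) pre) := by
  rw [Bool.eq_iff_iff]
  simp only [List.any_eq_true, beq_iff_eq, Bool.or_eq_true, PySem.Str.startswith_eq,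
    PySem.Chars.startswith_iff, PySem.Set.contains, List.contains_eq_mem, decide_eq_true_eq,
    PySem.Set.mem_ofList, mem_ancestorPrefixes_iff, String.toList_append]
  constructor
  · rintro ⟨p, hp, h⟩
    exact ⟨p, by simpa using h, hp⟩
  · rintro ⟨pre, h, hpre⟩
    exact ⟨pre, hpre, by simpa using h⟩

-- ===== VERDICT (by name: the statement is the Claim_ definition above) =====
theorem all_within_paths_py_spec : Claim_equal_all_within_paths_py := by
  intro changed_files editable_paths _
  unfold Spec_all_within_paths_py all_within_paths_py all_within_paths_py_alt
  dsimp only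
  congr 1
  funext violations f
  dsimp only
  rw [ok_eq]
  split_ifs <;> first | rfl | tauto
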